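-- pv_equiv track=rewrite | github.com/VlOIET/20252R0136DATA30400 | src/05_train_classifier.py | remove_all_ancestors
-- ===== SOURCE A (Python) =====
-- def remove_all_ancestors(labels, child2parents):
--     labels = set(labels)
--
--     changed = True
--     while changed:
--         changed = False
--         for l in list(labels):
--             for p in child2parents.get(l, []):
--                 if p in labels:
--                     labels.remove(p)
--                     changed = True
--
--     return sorted(labels)
-- ===== SOURCE B (Python) =====
-- def remove_all_ancestors(labels, child2parents):
--     S = set(labels)
--     ancestors = {p for l in S for p in child2parents.get(l, []) if p in S}
--     return sorted(S - ancestors)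
-- ===== Notes on version B (the rewrite author's own statement) =====
-- stated objective: simpler
-- what changed: Replaced the while/changed fixpoint loop that repeatedly deletes parents until stabilization with a single set comprehension computing all parents-of-any-original-label that lie in the label set, then one set difference; correctness rests on the fact that A's first pass already removes exactly that set.
import Mathlib
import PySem

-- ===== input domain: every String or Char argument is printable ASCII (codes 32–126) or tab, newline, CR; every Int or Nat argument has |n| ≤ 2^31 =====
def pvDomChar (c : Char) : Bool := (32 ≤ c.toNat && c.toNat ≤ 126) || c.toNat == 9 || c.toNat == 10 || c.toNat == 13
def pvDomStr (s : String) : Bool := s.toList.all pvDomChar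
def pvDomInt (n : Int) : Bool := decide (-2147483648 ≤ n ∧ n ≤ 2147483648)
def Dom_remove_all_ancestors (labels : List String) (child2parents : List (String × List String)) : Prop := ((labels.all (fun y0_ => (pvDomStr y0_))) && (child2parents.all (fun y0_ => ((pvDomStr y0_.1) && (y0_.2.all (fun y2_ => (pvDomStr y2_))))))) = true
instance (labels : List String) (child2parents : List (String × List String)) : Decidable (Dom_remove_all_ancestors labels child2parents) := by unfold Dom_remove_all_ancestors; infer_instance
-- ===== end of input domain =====

-- B replaces A's while/changed fixpoint deletion loop by one comprehension collecting all
-- in-set parents of the original labels, then a single set difference (simpler, one pass).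

-- ===== PORT A =====
-- child2parents.get(l, [])
def pvGetParentsA (c2p : List (String × List String)) (l : String) : List String :=
  PySem.Dict.getD (PySem.Dict.mk c2p) l []

-- 'if p in labels: labels.remove(p); changed = True' — set.remove on a present element = discard (exact here)
def pvRmA (st : List String × Bool) (p : String) : List String × Bool :=
  if PySem.Set.contains st.1 p then (PySem.Set.discard st.1 p, true) else st

-- 'for p in child2parents.get(l, []): …' (inner loop of one pass)
def pvStepA (c2p : List (String × List String)) (st : List String × Bool) (l : String) : List String × Bool :=
  (pvGetParentsA c2p l).foldl pvRmA st

-- one iteration of the while body: 'changed = False; for l in list(labels): …'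
def pvPassA (c2p : List (String × List String)) (labels : List String) : List String × Bool :=
  labels.foldl (pvStepA c2p) (labels, false)

-- termination lemma for the while loop (the pass shrinks the set whenever changed is set)
theorem pvRmA_len (st : List String × Bool) (p : String) :
    (pvRmA st p).1.length ≤ st.1.length ∧
      ((pvRmA st p).2 = true → st.2 = true ∨ (pvRmA st p).1.length < st.1.length) := by
  by_cases h : PySem.Set.contains st.1 p
  · have heq : pvRmA st p = (PySem.Set.discard st.1 p, true) := by
      rw [pvRmA, if_pos h]
    have hp : p ∈ st.1 := by
      simpa [PySem.Set.contains, List.contains_iff_mem] using h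
    have hlt : (PySem.Set.discard st.1 p).length < st.1.length := by
      unfold PySem.Set.discard
      rw [List.length_filter_lt_length_iff_exists]
      exact ⟨p, hp, by simp⟩
    rw [heq]
    exact ⟨Nat.le_of_lt hlt, fun _ => Or.inr hlt⟩
  · have heq : pvRmA st p = st := by rw [pvRmA, if_neg h]
    rw [heq]
    exact ⟨le_rfl, fun h2 => Or.inl h2⟩

theorem pvFoldRm_len (ps : List String) : ∀ (st : List String × Bool),
    (ps.foldl pvRmA st).1.length ≤ st.1.length ∧
      ((ps.foldl pvRmA st).2 = true → st.2 = true ∨ (ps.foldl pvRmA st).1.length < st.1.length) := by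
  induction ps with
  | nil => intro st; exact ⟨le_rfl, fun h => Or.inl h⟩
  | cons p ps ih =>
    intro st
    have h1 := pvRmA_len st p
    have h2 := ih (pvRmA st p)
    refine ⟨le_trans h2.1 h1.1, fun hfl => ?_⟩
    rcases h2.2 hfl with h | h
    · rcases h1.2 h with h' | h'
      · exact Or.inl h'
      · exact Or.inr (lt_of_le_of_lt h2.1 h')
    · exact Or.inr (lt_of_lt_of_le h h1.1)

theorem pvPassFold_len (c2p : List (String × List String)) (snap : List String) :
    ∀ (st : List String × Bool),
    (snap.foldl (pvStepA c2p) st).1.length ≤ st.1.length ∧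
      ((snap.foldl (pvStepA c2p) st).2 = true →
        st.2 = true ∨ (snap.foldl (pvStepA c2p) st).1.length < st.1.length) := by
  induction snap with
  | nil => intro st; exact ⟨le_rfl, fun h => Or.inl h⟩
  | cons l ls ih =>
    intro st
    have h1 := pvFoldRm_len (pvGetParentsA c2p l) st
    have h2 := ih (pvStepA c2p st l)
    refine ⟨le_trans h2.1 h1.1, fun hfl => ?_⟩
    rcases h2.2 hfl with h | h
    · rcases h1.2 h with h' | h'
      · exact Or.inl h'
      · exact Or.inr (lt_of_le_of_lt h2.1 h')
    · exact Or.inr (lt_of_lt_of_le h h1.1)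

-- 'while changed: …'
def pvLoopA (c2p : List (String × List String)) (labels : List String) : List String :=
  let r := pvPassA c2p labels
  if _h : r.2 then pvLoopA c2p r.1 else r.1
termination_by labels.length
decreasing_by
  have := pvPassFold_len c2p labels (labels, false)
  rcases this.2 _h with h' | h'
  · exact absurd h' (by simp)
  · exact h'

def remove_all_ancestors (labels : List String) (child2parents : List (String × List String)) : List String :=
  PySem.List.sorted (pvLoopA child2parents (PySem.Set.ofList labels)) (fun x => x)

-- ===== PORT B =====
def remove_all_ancestors_alt (labels : List String) (child2parents : List (String × List String)) : List String :=
  let S := PySem.Set.ofList labels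
  let ancestors :=
    S.foldl (fun acc l =>
      (PySem.Dict.getD (PySem.Dict.mk child2parents) l []).foldl
        (fun acc p => if PySem.Set.contains S p then PySem.Set.add acc p else acc) acc)
      PySem.Set.empty
  PySem.List.sorted (PySem.Set.diff S ancestors) (fun x => x)

-- ===== PRECONDITION & SPEC =====
def Spec_remove_all_ancestors (labels : List String) (child2parents : List (String × List String)) (out : List String) : Prop := out = remove_all_ancestors_alt labels child2parents
instance (labels : List String) (child2parents : List (String × List String)) (out : List String) : Decidable (Spec_remove_all_ancestors labels child2parents out) := by unfold Spec_remove_all_ancestors; infer_instance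

-- ===== CLAIM (what is proved, stated in full; the proofs are below) =====
def Claim_equal_remove_all_ancestors : Prop := ∀ (labels : List String) (child2parents : List (String × List String)), Dom_remove_all_ancestors labels child2parents → Spec_remove_all_ancestors labels child2parents (remove_all_ancestors labels child2parents)

-- ===== LEMMAS AND PROOFS =====

-- all parents mentioned by any label of snap (proof-only helper)
def pvPar (c2p : List (String × List String)) (snap : List String) : List String :=
  snap.flatMap (pvGetParentsA c2p)

theorem pvFoldRm_fst (ps : List String) : ∀ (xs : List String) (b : Bool),
    (ps.foldl pvRmA (xs, b)).1 = xs.filter (fun x => !ps.contains x) := by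
  induction ps with
  | nil => intro xs b; simp
  | cons p ps ih =>
    intro xs b
    simp only [List.foldl_cons]
    by_cases h : PySem.Set.contains xs p
    · have hstep : pvRmA (xs, b) p = (xs.filter (fun y => !(y == p)), true) := by
        rw [pvRmA, if_pos h]; rfl
      rw [hstep, ih, List.filter_filter]
      apply List.filter_congr
      intro x _
      by_cases hxp : x = p <;> simp [hxp]
    · have hstep : pvRmA (xs, b) p = (xs, b) := by rw [pvRmA, if_neg h]
      rw [hstep, ih]
      have hp : p ∉ xs := by
        simpa [PySem.Set.contains, List.contains_iff_mem] using h
      apply List.filter_congr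
      intro x hx
      have hxp : x ≠ p := fun he => hp (he ▸ hx)
      simp [hxp]

theorem pvPass_fst (c2p : List (String × List String)) (snap : List String) :
    ∀ (xs : List String) (b : Bool),
    (snap.foldl (pvStepA c2p) (xs, b)).1 = xs.filter (fun x => !(pvPar c2p snap).contains x) := by
  induction snap with
  | nil => intro xs b; simp [pvPar]
  | cons l ls ih =>
    intro xs b
    simp only [List.foldl_cons]
    have hstep : pvStepA c2p (xs, b) l =
        ((pvStepA c2p (xs, b) l).1, (pvStepA c2p (xs, b) l).2) := rfl
    rw [hstep, ih]
    have h1 : (pvStepA c2p (xs, b) l).1 = xs.filter (fun x => !(pvGetParentsA c2p l).contains x) :=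
      pvFoldRm_fst (pvGetParentsA c2p l) xs b
    rw [h1, List.filter_filter]
    apply List.filter_congr
    intro x _
    simp only [pvPar, List.flatMap_cons]
    by_cases h2 : x ∈ pvGetParentsA c2p l <;>
      by_cases h3 : x ∈ ls.flatMap (pvGetParentsA c2p) <;>
      simp [h2, h3, pvPar, List.mem_flatMap] at *

theorem pvPassA_fst (c2p : List (String × List String)) (ys : List String) :
    (pvPassA c2p ys).1 = ys.filter (fun x => !(pvPar c2p ys).contains x) :=
  pvPass_fst c2p ys ys false

theorem pvPassA_len (c2p : List (String × List String)) (ys : List String) :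
    (pvPassA c2p ys).2 = true → (pvPassA c2p ys).1.length < ys.length := by
  intro h
  have := pvPassFold_len c2p ys (ys, false)
  rcases this.2 h with hc | hc
  · exact absurd hc (by simp)
  · exact hc

theorem pvLoopA_eq (c2p : List (String × List String)) (xs : List String) :
    pvLoopA c2p xs = xs.filter (fun x => !(pvPar c2p xs).contains x) := by
  rw [pvLoopA]
  have h1 := pvPassA_fst c2p xs
  by_cases h : (pvPassA c2p xs).2
  · rw [dif_pos h, pvLoopA]
    -- the second pass changes nothing: surviving labels have no surviving in-set parents
    have hid : (pvPassA c2p xs).1.filter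
        (fun x => !(pvPar c2p (pvPassA c2p xs).1).contains x) = (pvPassA c2p xs).1 := by
      apply List.filter_eq_self.mpr
      intro x hx
      rw [h1] at hx
      have hx' := List.of_mem_filter hx
      have hnx : x ∉ pvPar c2p xs := by
        simpa [List.contains_iff_mem] using hx'
      have hsub : x ∉ pvPar c2p (pvPassA c2p xs).1 := by
        intro hm
        rcases List.mem_flatMap.mp hm with ⟨l, hl, hpl⟩
        exact hnx (List.mem_flatMap.mpr ⟨l, List.mem_of_mem_filter (h1 ▸ hl), hpl⟩)
      simpa [List.contains_iff_mem] using hsub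
    have h2 : (pvPassA c2p (pvPassA c2p xs).1).1 = (pvPassA c2p xs).1 := by
      rw [pvPassA_fst c2p (pvPassA c2p xs).1, hid]
    rcases Bool.eq_false_or_eq_true ((pvPassA c2p (pvPassA c2p xs).1).2) with hfl | hfl
    · exact absurd (h2 ▸ pvPassA_len c2p (pvPassA c2p xs).1 hfl) (lt_irrefl _)
    · rw [dif_neg (by simp [hfl]), h2, h1]
  · rw [dif_neg h]
    exact h1

-- membership in the inner comprehension fold of B
theorem pvMemInnerB (S : List String) (ps : List String) : ∀ (acc : List String) (x : String),
    x ∈ ps.foldl (fun acc p => if PySem.Set.contains S p then PySem.Set.add acc p else acc) acc ↔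
      x ∈ acc ∨ (x ∈ ps ∧ x ∈ S) := by
  induction ps with
  | nil => intro acc x; simp
  | cons p ps ih =>
    intro acc x
    simp only [List.foldl_cons]
    rw [ih]
    by_cases hp : p ∈ S
    · have hc : PySem.Set.contains S p = true := by
        simp [PySem.Set.contains, hp]
      simp only [hc, if_pos]
      rw [PySem.Set.mem_add]
      simp only [List.mem_cons]
      have hxp : x = p → x ∈ S := fun he => he ▸ hp
      tauto
    · have hc : PySem.Set.contains S p = false := by
        simp [PySem.Set.contains, hp]
      simp only [hc, Bool.false_eq_true, if_neg, not_false_iff]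
      simp only [List.mem_cons]
      have hxp : x = p → x ∈ S → False := fun he hS => hp (he ▸ hS)
      tauto

theorem pvMemAncB (c2p : List (String × List String)) (S : List String) :
    ∀ (ls acc : List String) (x : String),
    x ∈ ls.foldl (fun acc l =>
        (PySem.Dict.getD (PySem.Dict.mk c2p) l []).foldl
          (fun acc p => if PySem.Set.contains S p then PySem.Set.add acc p else acc) acc) acc ↔
      x ∈ acc ∨ ∃ l ∈ ls, x ∈ PySem.Dict.getD (PySem.Dict.mk c2p) l [] ∧ x ∈ S := by
  intro ls
  induction ls with
  | nil => intro acc x; simp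
  | cons l ls ih =>
    intro acc x
    simp only [List.foldl_cons]
    rw [ih, pvMemInnerB]
    constructor
    · rintro ((ha | ⟨hm, hS⟩) | ⟨l', hl', hm', hS'⟩)
      · exact Or.inl ha
      · exact Or.inr ⟨l, List.mem_cons_self, hm, hS⟩
      · exact Or.inr ⟨l', List.mem_cons_of_mem _ hl', hm', hS'⟩
    · rintro (ha | ⟨l', hl', hm', hS'⟩)
      · exact Or.inl (Or.inl ha)
      · rcases List.mem_cons.mp hl' with he | hl''
        · subst he
          exact Or.inl (Or.inr ⟨hm', hS'⟩)
        · exact Or.inr ⟨l', hl'', hm', hS'⟩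

-- ===== VERDICT (by name: the statement is the Claim_ definition above) =====
theorem remove_all_ancestors_spec : Claim_equal_remove_all_ancestors := by
  intro labels c2p _
  unfold Spec_remove_all_ancestors remove_all_ancestors remove_all_ancestors_alt
  rw [pvLoopA_eq]
  congr 1
  unfold PySem.Set.diff
  apply List.filter_congr
  intro x hx
  congr 1
  rw [Bool.eq_iff_iff, List.contains_iff_mem, PySem.Set.contains_iff, pvMemAncB]
  constructor
  · intro hmem
    rcases List.mem_flatMap.mp hmem with ⟨l, hl, hpl⟩
    exact Or.inr ⟨l, hl, hpl, hx⟩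
  · rintro (ha | ⟨l, hl, hm, _⟩)
    · exact absurd ha (by simp [PySem.Set.empty])
    · exact List.mem_flatMap.mpr ⟨l, hl, hm⟩
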